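-- pv_equiv track=rewrite | github.com/Arsen1302/Code-copy-detector | TestData/solutions/problem_521_3.py | solution_521_3
-- ===== SOURCE A (Python) =====
-- from typing import List
--
-- def solution_521_3(s: str, indices: List[int], sources: List[str], targets: List[str]) -> str:
--     match = sorted([(idx, i, len(sources[i])) for i, idx in enumerate(indices) if s[idx:].startswith(sources[i])])
--     if not match: return s
--     ans, cur = '', 0
--     for idx, i, n in match:
--         ans += s[cur:idx] + targets[i]
--         cur = idx + n
--     else:
--         ans += s[cur:]
--     return ans
-- ===== SOURCE B (Python) =====
-- from typing import List
--
-- def solution_521_3(s: str, indices: List[int], sources: List[str], targets: List[str]) -> str: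
--     # No sort: repeatedly extract the smallest remaining match and splice,
--     # collecting pieces in a list joined once at the end.
--     pending = [(idx, i, len(sources[i])) for i, idx in enumerate(indices)
--                if s[idx:].startswith(sources[i])]
--     pieces = []
--     cur = 0
--     while pending:
--         best = min(pending)
--         pending.remove(best)
--         idx, i, n = best
--         pieces.append(s[cur:idx])
--         pieces.append(targets[i])
--         cur = idx + n
--     pieces.append(s[cur:])
--     return ''.join(pieces)
-- ===== Notes on version B (the rewrite author's own statement) =====
-- stated objective: alternative
-- what changed: Removes the library sort and the stateful string-concatenation loop: B repeatedly extracts the lexicographically smallest remaining match with min() and remove() (selection) and collects the spliced pieces in a list joined once at the end.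
import Mathlib
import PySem

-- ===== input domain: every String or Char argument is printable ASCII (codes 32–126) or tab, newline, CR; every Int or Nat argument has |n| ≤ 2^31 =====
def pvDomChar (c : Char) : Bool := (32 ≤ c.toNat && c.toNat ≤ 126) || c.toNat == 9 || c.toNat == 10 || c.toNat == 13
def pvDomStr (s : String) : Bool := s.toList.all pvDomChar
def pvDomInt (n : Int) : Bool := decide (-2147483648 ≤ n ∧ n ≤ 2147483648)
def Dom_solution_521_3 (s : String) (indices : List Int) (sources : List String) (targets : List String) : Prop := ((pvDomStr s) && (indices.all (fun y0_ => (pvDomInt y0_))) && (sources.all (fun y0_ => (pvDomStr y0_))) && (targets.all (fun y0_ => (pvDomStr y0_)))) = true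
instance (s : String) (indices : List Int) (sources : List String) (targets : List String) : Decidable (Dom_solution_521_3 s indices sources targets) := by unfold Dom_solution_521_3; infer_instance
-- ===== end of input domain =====

-- B removes A's library sort and stateful string concatenation: it repeatedly extracts the
-- lexicographically smallest remaining match (selection) and collects pieces in a list joined
-- once; same return value on every input Pre_ admits (return value only, no mutation claim).


-- ===== PORT A =====
-- Python compares the tuples (idx, i, n) lexicographically: ported with the lex key pvKeyA.
def pvKeyA (m : Int × Int × Int) : Lex (Int × Lex (Int × Int)) := toLex (m.1, toLex (m.2.1, m.2.2))

-- the comprehension [(idx, i, len(sources[i])) for i, idx in enumerate(indices) if s[idx:].startswith(sources[i])]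
-- (shared verbatim by both Pythons)
def pvF (s : String) (indices : List Int) (sources : List String) : List (Int × Int) :=
  (PySem.List.enumerate indices).filter
    (fun p => PySem.Chars.startswith (PySem.List.slice s.toList (some p.2) none)
                (PySem.List.pyGetD sources p.1 "").toList)

def pvM (s : String) (indices : List Int) (sources : List String) : List (Int × Int × Int) :=
  (pvF s indices sources).map (fun p => (p.2, p.1, (((PySem.List.pyGetD sources p.1 "").toList.length : Int))))

def solution_521_3 (s : String) (indices : List Int) (sources : List String) (targets : List String) : String :=
  let cs := s.toList
  let matchL := PySem.List.sorted (pvM s indices sources) pvKeyA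
  if matchL = [] then s
  else
    let r := matchL.foldl
      (fun (ac : List Char × Int) m =>
        (ac.1 ++ PySem.List.slice cs (some ac.2) (some m.1)
              ++ (PySem.List.pyGetD targets m.2.1 "").toList,
         m.1 + m.2.2)) ([], 0)
    String.ofList (r.1 ++ PySem.List.slice cs (some r.2) none)

-- ===== PORT B =====
-- the while loop: best = min(pending); pending.remove(best); two appends; cur = idx + n.
-- fuel only makes the recursion total: the loop runs exactly once per element of pending,
-- so fuel = pending.length is never exhausted (remove? shrinks the list by one each time).
def pvSel (cs : List Char) (targets : List String) :
    Nat → List (Int × Int × Int) → List (List Char) → Int → List (List Char) × Int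
  | 0, _, pieces, cur => (pieces, cur)
  | fuel+1, pending, pieces, cur =>
      match PySem.List.min? pending pvKeyA with
      | none => (pieces, cur)
      | some b =>
          pvSel cs targets fuel ((PySem.List.remove? pending b).getD [])
            (pieces ++ [PySem.List.slice cs (some cur) (some b.1)]
                    ++ [(PySem.List.pyGetD targets b.2.1 "").toList])
            (b.1 + b.2.2)

def solution_521_3_alt (s : String) (indices : List Int) (sources : List String) (targets : List String) : String :=
  let cs := s.toList
  let pending := pvM s indices sources
  let r := pvSel cs targets pending.length pending [] 0
  String.ofList (PySem.Chars.join [] (r.1 ++ [PySem.List.slice cs (some r.2) none]))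

-- ===== PRECONDITION & SPEC =====
def pvMatchAt (s : String) (indices : List Int) (sources : List String) (k : Nat) : Bool :=
  PySem.Chars.startswith (PySem.List.slice s.toList (some (indices.getD k 0)) none)
    (sources.getD k "").toList

-- Pre_ excludes exactly the inputs on which the Python A raises an IndexError:
-- sources shorter than indices, or a matched position k beyond targets.
def Pre_solution_521_3 (s : String) (indices : List Int) (sources : List String) (targets : List String) : Prop :=
  indices.length ≤ sources.length ∧
  (∀ k ∈ List.range indices.length, pvMatchAt s indices sources k = true → k < targets.length)

instance (s : String) (indices : List Int) (sources : List String) (targets : List String) : Decidable (Pre_solution_521_3 s indices sources targets) := by unfold Pre_solution_521_3; infer_instance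

def pvWitness_solution_521_3 : String × List Int × List String × List String :=
  ("abcde", [0, 3], ["ab", "de"], ["X", "YZ"])

def Spec_solution_521_3 (s : String) (indices : List Int) (sources : List String) (targets : List String) (out : String) : Prop := out = solution_521_3_alt s indices sources targets
instance (s : String) (indices : List Int) (sources : List String) (targets : List String) (out : String) : Decidable (Spec_solution_521_3 s indices sources targets out) := by unfold Spec_solution_521_3; infer_instance

-- ===== CLAIM (what is proved, stated in full; the proofs are below) =====
def Claim_equal_solution_521_3 : Prop := ∀ (s : String) (indices : List Int) (sources : List String) (targets : List String), Dom_solution_521_3 s indices sources targets → Pre_solution_521_3 s indices sources targets → Spec_solution_521_3 s indices sources targets (solution_521_3 s indices sources targets)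

-- ===== LEMMAS AND PROOFS =====

theorem pvWitness_ok :
    Dom_solution_521_3 (pvWitness_solution_521_3.1) (pvWitness_solution_521_3.2.1)
      (pvWitness_solution_521_3.2.2.1) (pvWitness_solution_521_3.2.2.2) ∧
    Pre_solution_521_3 (pvWitness_solution_521_3.1) (pvWitness_solution_521_3.2.1)
      (pvWitness_solution_521_3.2.2.1) (pvWitness_solution_521_3.2.2.2) := by
  constructor <;> decide

-- the common canonical form: replace the matches of L left to right, starting at cur
def pvStitch (cs : List Char) (targets : List String) : Int → List (Int × Int × Int) → List Char
  | cur, [] => PySem.List.slice cs (some cur) none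
  | cur, m :: L =>
      PySem.List.slice cs (some cur) (some m.1) ++ (PySem.List.pyGetD targets m.2.1 "").toList
        ++ pvStitch cs targets (m.1 + m.2.2) L

-- A's accumulator loop computes pvStitch
theorem pvFoldA (cs : List Char) (targets : List String) :
    ∀ (L : List (Int × Int × Int)) (ans : List Char) (cur : Int),
      (L.foldl (fun (ac : List Char × Int) m =>
          (ac.1 ++ PySem.List.slice cs (some ac.2) (some m.1)
                ++ (PySem.List.pyGetD targets m.2.1 "").toList, m.1 + m.2.2)) (ans, cur)).1
        ++ PySem.List.slice cs
            (some ((L.foldl (fun (ac : List Char × Int) m =>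
          (ac.1 ++ PySem.List.slice cs (some ac.2) (some m.1)
                ++ (PySem.List.pyGetD targets m.2.1 "").toList, m.1 + m.2.2)) (ans, cur)).2)) none
      = ans ++ pvStitch cs targets cur L := by
  intro L
  induction L with
  | nil => intro ans cur; simp [pvStitch]
  | cons m L ih =>
      intro ans cur
      simp only [List.foldl_cons, pvStitch]
      rw [ih]
      simp [List.append_assoc]

-- ''.join concatenates
theorem pvJoin_empty_sep : ∀ (l : List (List Char)), PySem.Chars.join [] l = l.flatten := by
  intro l
  induction l with
  | nil => exact PySem.Chars.join_nil []
  | cons x t ih =>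
      cases t with
      | nil => simp [PySem.Chars.join_singleton]
      | cons y u =>
          rw [PySem.Chars.join_cons_cons, ih]
          simp

-- list.remove(b) removes one occurrence of a present element
theorem pvRemovePerm {α : Type} [BEq α] [LawfulBEq α] (l : List α) (b : α) (h : b ∈ l) :
    ∃ l', PySem.List.remove? l b = some l' ∧ l.Perm (b :: l') := by
  cases hi : List.idxOf? b l with
  | none => rw [List.idxOf?_eq_none_iff] at hi; exact absurd h hi
  | some k =>
      have hk : k = List.idxOf b l := by
        have := List.idxOf_eq_getD_idxOf? b l
        rw [hi] at this
        simpa using this.symm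
      refine ⟨l.eraseIdx k, by simp [PySem.List.remove?, hi], ?_⟩
      rw [hk, List.eraseIdx_idxOf_eq_erase]
      exact List.perm_cons_erase h

theorem pvKeyA_injective : Function.Injective pvKeyA := by
  intro a b h
  unfold pvKeyA at h
  have h' := congrArg ofLex h
  simp only [ofLex_toLex, Prod.mk.injEq] at h'
  obtain ⟨h1, h2⟩ := h'
  have h2' := congrArg ofLex h2
  simp only [ofLex_toLex, Prod.mk.injEq] at h2'
  exact Prod.ext h1 (Prod.ext h2'.1 h2'.2)

-- extracting the minimum peels off the head of the sorted list
theorem pvSorted_cons_of_min (pending l' : List (Int × Int × Int)) (b : Int × Int × Int)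
    (hmin : PySem.List.min? pending pvKeyA = some b)
    (hperm : pending.Perm (b :: l')) :
    PySem.List.sorted pending pvKeyA = b :: PySem.List.sorted l' pvKeyA := by
  refine PySem.List.eq_of_perm_of_pairwise_le_of_injective pvKeyA pvKeyA_injective ?_ ?_ ?_
  · exact ((PySem.List.sorted_perm pending pvKeyA false).trans hperm).trans
      ((PySem.List.sorted_perm l' pvKeyA false).cons b).symm
  · exact PySem.List.sorted_pairwise pending pvKeyA
  · refine List.pairwise_cons.mpr ⟨?_, PySem.List.sorted_pairwise l' pvKeyA⟩
    intro m hm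
    have hm' : m ∈ pending := hperm.mem_iff.mpr
      (List.mem_cons_of_mem _ ((PySem.List.sorted_perm l' pvKeyA false).mem_iff.mp hm))
    exact PySem.List.min?_isMin hmin m hm'

-- B's selection loop computes pvStitch of the sorted pending list
theorem pvSelStitch (cs : List Char) (targets : List String) :
    ∀ (fuel : Nat) (pending : List (Int × Int × Int)) (pieces : List (List Char)) (cur : Int),
      pending.length ≤ fuel →
      ((pvSel cs targets fuel pending pieces cur).1
          ++ [PySem.List.slice cs (some (pvSel cs targets fuel pending pieces cur).2) none]).flatten
        = pieces.flatten ++ pvStitch cs targets cur (PySem.List.sorted pending pvKeyA) := by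
  intro fuel
  induction fuel with
  | zero =>
      intro pending pieces cur hf
      have hnil : pending = [] := List.length_eq_zero_iff.mp (Nat.le_zero.mp hf)
      subst hnil
      have hs : PySem.List.sorted ([] : List (Int × Int × Int)) pvKeyA = [] :=
        (PySem.List.sorted_eq_nil_iff _ _ _).mpr rfl
      simp [pvSel, pvStitch, hs]
  | succ fuel ih =>
      intro pending pieces cur hf
      cases hmin : PySem.List.min? pending pvKeyA with
      | none =>
          have hnil : pending = [] := (PySem.List.min?_eq_none_iff pending pvKeyA).mp hmin
          subst hnil
          have hs : PySem.List.sorted ([] : List (Int × Int × Int)) pvKeyA = [] :=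
            (PySem.List.sorted_eq_nil_iff _ _ _).mpr rfl
          simp [pvSel, pvStitch, hs, hmin]
      | some b =>
          obtain ⟨l', hrem, hperm⟩ :=
            pvRemovePerm pending b (PySem.List.min?_mem hmin)
          have hlen : l'.length ≤ fuel := by
            have := hperm.length_eq
            simp only [List.length_cons] at this
            omega
          simp only [pvSel, hmin, hrem, Option.getD_some]
          rw [ih l' _ _ hlen]
          rw [pvSorted_cons_of_min pending l' b hmin hperm]
          simp [pvStitch, List.append_assoc]

-- ===== VERDICT (by name: the statement is the Claim_ definition above) =====
theorem solution_521_3_spec : Claim_equal_solution_521_3 := by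
  intro s indices sources targets _ _
  show solution_521_3 s indices sources targets = solution_521_3_alt s indices sources targets
  show (let cs := s.toList;
        let matchL := PySem.List.sorted (pvM s indices sources) pvKeyA;
        if matchL = [] then s
        else
          let r := matchL.foldl
            (fun (ac : List Char × Int) m =>
              (ac.1 ++ PySem.List.slice cs (some ac.2) (some m.1)
                    ++ (PySem.List.pyGetD targets m.2.1 "").toList, m.1 + m.2.2)) ([], 0)
          String.ofList (r.1 ++ PySem.List.slice cs (some r.2) none))
      = solution_521_3_alt s indices sources targets
  have hB : solution_521_3_alt s indices sources targets
      = String.ofList (pvStitch s.toList targets 0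
          (PySem.List.sorted (pvM s indices sources) pvKeyA)) := by
    show String.ofList _ = _
    rw [pvJoin_empty_sep, pvSelStitch s.toList targets (pvM s indices sources).length
      (pvM s indices sources) [] 0 le_rfl]
    simp
  rw [hB]
  by_cases hc : PySem.List.sorted (pvM s indices sources) pvKeyA = []
  · simp only [hc]
    simp [pvStitch, PySem.List.slice_none_none]
  · simp only [if_neg hc]
    rw [pvFoldA s.toList targets (PySem.List.sorted (pvM s indices sources) pvKeyA) [] 0]
    simp
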